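-- pv_equiv track=rewrite | github.com/ClaireBiv/advent_of_code_2024 | Giorno13/punto1.py | isMultiplo
-- ===== SOURCE A (Python) =====
-- def subLists(x, y):
--     return [x[0]-y[0], x[1]-y[1]]
--
-- def isMultiplo(a,b):
--     r = 0
--     while all(i>0 for i in a):
--         r += 1
--         a = subLists(a,b)
--         if a == [0,0]:
--             return True, r
--     return False, None
-- ===== SOURCE B (Python) =====
-- def isMultiplo(a, b):
--     # a is a positive multiple r of b iff b > 0 componentwise,
--     # b[0] divides a[0] and the quotient reproduces a[1]
--     if any(i <= 0 for i in a):
--         return False, None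
--     a0, a1, b0, b1 = a[0], a[1], b[0], b[1]
--     if b0 > 0 and b1 > 0 and a0 % b0 == 0 and a0 // b0 * b1 == a1:
--         return True, a0 // b0
--     return False, None
-- ===== Notes on version B (the rewrite author's own statement) =====
-- stated objective: alternative
-- what changed: replaces the repeated-subtraction loop by a direct divisibility/quotient check (b>0 componentwise, b[0] | a[0], quotient consistent with a[1])
import Mathlib
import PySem

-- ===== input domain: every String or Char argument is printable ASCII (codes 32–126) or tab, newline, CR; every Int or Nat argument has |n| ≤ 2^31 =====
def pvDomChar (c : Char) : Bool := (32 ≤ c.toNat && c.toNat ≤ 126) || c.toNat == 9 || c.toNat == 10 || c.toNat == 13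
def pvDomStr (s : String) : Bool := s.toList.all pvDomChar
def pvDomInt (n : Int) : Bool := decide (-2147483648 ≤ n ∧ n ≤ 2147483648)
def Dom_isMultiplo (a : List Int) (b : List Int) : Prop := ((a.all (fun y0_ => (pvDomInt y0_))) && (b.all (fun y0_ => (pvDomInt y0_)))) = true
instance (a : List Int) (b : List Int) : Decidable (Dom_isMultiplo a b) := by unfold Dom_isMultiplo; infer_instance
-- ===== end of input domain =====

-- B replaces A's repeated-subtraction loop by a direct divisibility/quotient check.
-- Pre_ excludes inputs where A raises IndexError (all-positive a with len(a)<2 or len(b)<2)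
-- or diverges (all-positive a with b[0] ≤ 0 and b[1] ≤ 0); A returns no value there.


-- ===== PORT A =====
-- subLists(x, y): x[0]/x[1]/y[0]/y[1] may raise IndexError → none (excluded by Pre_)
def subLists (x : List Int) (y : List Int) : Option (List Int) :=
  match PySem.List.pyGet? x 0, PySem.List.pyGet? x 1,
        PySem.List.pyGet? y 0, PySem.List.pyGet? y 1 with
  | some x0, some x1, some y0, some y1 => some [x0 - y0, x1 - y1]
  | _, _, _, _ => none

-- A's while loop; fuel only makes the recursion total (under Pre_ it never runs out);
-- the (false, none) results for fuel = 0 / IndexError are unreachable under Pre_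
def isMultiploLoop (b : List Int) : Nat → List Int → Int → Bool × Option Int
  | 0, _, _ => (false, none)
  | fuel + 1, a, r =>
    if a.all (fun i => decide (0 < i)) then
      match subLists a b with
      | some a' =>
        if a' = ([0, 0] : List Int) then (true, some (r + 1))
        else isMultiploLoop b fuel a' (r + 1)
      | none => (false, none)
    else (false, none)

def isMultiplo (a : List Int) (b : List Int) : Bool × Option Int :=
  isMultiploLoop b ((a.map Int.toNat).sum + 1) a 0

-- ===== PORT B =====
def isMultiplo_alt (a : List Int) (b : List Int) : Bool × Option Int :=
  if a.any (fun i => decide (i ≤ 0)) then (false, none)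
  else
    match PySem.List.pyGet? a 0, PySem.List.pyGet? a 1,
          PySem.List.pyGet? b 0, PySem.List.pyGet? b 1 with
    | some a0, some a1, some b0, some b1 =>
      if 0 < b0 ∧ 0 < b1 ∧ PySem.Int.mod a0 b0 = 0 ∧ PySem.Int.floordiv a0 b0 * b1 = a1
      then (true, some (PySem.Int.floordiv a0 b0))
      else (false, none)
    | _, _, _, _ => (false, none)   -- IndexError (excluded by Pre_; B's Python raises here too)

-- ===== PRECONDITION & SPEC =====
-- Pre_ excludes exactly the inputs where A raises IndexError (a all-positive and len(a) < 2
-- or len(b) < 2) or diverges (a all-positive and b[0] ≤ 0 and b[1] ≤ 0); A returns no value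
-- on any excluded input.
def Pre_isMultiplo (a : List Int) (b : List Int) : Prop :=
  (∃ x ∈ a, x ≤ 0) ∨
  (2 ≤ a.length ∧ 2 ≤ b.length ∧ (0 < b.getD 0 0 ∨ 0 < b.getD 1 0))
instance (a : List Int) (b : List Int) : Decidable (Pre_isMultiplo a b) := by
  unfold Pre_isMultiplo; infer_instance

def pvWitness_isMultiplo : List Int × List Int := ([4, 6], [2, 3])

def Spec_isMultiplo (a : List Int) (b : List Int) (out : Bool × Option Int) : Prop := out = isMultiplo_alt a b
instance (a : List Int) (b : List Int) (out : Bool × Option Int) : Decidable (Spec_isMultiplo a b out) := by unfold Spec_isMultiplo; infer_instance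

-- ===== CLAIM (what is proved, stated in full; the proofs are below) =====
def Claim_equal_isMultiplo : Prop := ∀ (a : List Int) (b : List Int), Dom_isMultiplo a b → Pre_isMultiplo a b → Spec_isMultiplo a b (isMultiplo a b)

-- ===== LEMMAS AND PROOFS =====

-- closed form of what A's loop computes from a 2-element all-positive state
def pvT (b0 b1 a0 a1 r : Int) : Bool × Option Int :=
  if 0 < a0 ∧ 0 < a1 ∧ 0 < b0 ∧ 0 < b1 ∧ b0 ∣ a0 ∧ a0 / b0 * b1 = a1
  then (true, some (r + a0 / b0)) else (false, none)

lemma pvT_hit (b0 b1 r : Int) (h0 : 0 < b0) (h1 : 0 < b1) :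
    pvT b0 b1 b0 b1 r = (true, some (r + 1)) := by
  unfold pvT
  rw [if_pos ⟨h0, h1, h0, h1, dvd_refl _, by rw [Int.ediv_self h0.ne', one_mul]⟩,
    Int.ediv_self h0.ne']

lemma pvT_step (b0 b1 a0 a1 r : Int) (h0 : 0 < a0) (h1 : 0 < a1)
    (hne : ¬(a0 - b0 = 0 ∧ a1 - b1 = 0)) :
    pvT b0 b1 (a0 - b0) (a1 - b1) (r + 1) = pvT b0 b1 a0 a1 r := by
  unfold pvT
  by_cases hc : 0 < a0 ∧ 0 < a1 ∧ 0 < b0 ∧ 0 < b1 ∧ b0 ∣ a0 ∧ a0 / b0 * b1 = a1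
  · obtain ⟨-, -, hb0, hb1, hdvd, hq⟩ := hc
    have hqb : a0 / b0 * b0 = a0 := Int.ediv_mul_cancel hdvd
    set q := a0 / b0 with hqdef
    have hq1 : 1 ≤ q := by nlinarith
    have hqne : q ≠ 1 := by
      intro h; apply hne; constructor <;> nlinarith
    have hq2 : 2 ≤ q := by omega
    have h0' : 0 < a0 - b0 := by
      nlinarith [mul_nonneg (show (0:Int) ≤ q - 2 by omega) hb0.le]
    have h1' : 0 < a1 - b1 := by
      nlinarith [mul_nonneg (show (0:Int) ≤ q - 2 by omega) hb1.le]
    have hdvd' : b0 ∣ a0 - b0 := dvd_sub hdvd (dvd_refl b0)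
    have hqd' : (a0 - b0) / b0 = q - 1 := by
      rw [show a0 - b0 = (q - 1) * b0 by nlinarith, Int.mul_ediv_cancel _ hb0.ne']
    rw [if_pos ⟨h0', h1', hb0, hb1, hdvd', by rw [hqd']; nlinarith⟩,
      if_pos ⟨h0, h1, hb0, hb1, hdvd, hq⟩, hqd']
    simp only [Prod.mk.injEq, Option.some.injEq, true_and]
    ring
  · rw [if_neg hc, if_neg]
    intro hc'
    obtain ⟨h0', h1', hb0, hb1, hdvd', hq'⟩ := hc'
    apply hc
    have hqb' : (a0 - b0) / b0 * b0 = a0 - b0 := Int.ediv_mul_cancel hdvd'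
    set q' := (a0 - b0) / b0 with hq'def
    have hdvd : b0 ∣ a0 := by
      have := dvd_add hdvd' (dvd_refl b0); simpa using this
    have hqd : a0 / b0 = q' + 1 := by
      rw [show a0 = (q' + 1) * b0 by nlinarith, Int.mul_ediv_cancel _ hb0.ne']
    exact ⟨h0, h1, hb0, hb1, hdvd, by rw [hqd]; nlinarith⟩

lemma loop_eq_pvT (b : List Int) (b0 b1 : Int)
    (hb0 : PySem.List.pyGet? b 0 = some b0) (hb1 : PySem.List.pyGet? b 1 = some b1) :
    ∀ (fuel : Nat) (a0 a1 r : Int),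
      ((0 < b0 ∧ a0.toNat < fuel) ∨ (0 < b1 ∧ a1.toNat < fuel)) →
      isMultiploLoop b fuel [a0, a1] r = pvT b0 b1 a0 a1 r := by
  intro fuel
  induction fuel with
  | zero => intro a0 a1 r h; omega
  | succ n ih =>
    intro a0 a1 r h
    by_cases hpos : 0 < a0 ∧ 0 < a1
    · have hall : ([a0, a1].all (fun i => decide (0 < i))) = true := by
        simp [hpos.1, hpos.2]
      have hsub : subLists [a0, a1] b = some [a0 - b0, a1 - b1] := by
        simp [subLists, hb0, hb1]
      by_cases hz : ([a0 - b0, a1 - b1] : List Int) = ([0, 0] : List Int)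
      · simp only [isMultiploLoop, hall, if_true, hsub, hz, if_pos]
        have hz' : a0 = b0 ∧ a1 = b1 := by
          simp only [List.cons.injEq, and_true] at hz; omega
        rw [hz'.1, hz'.2, pvT_hit b0 b1 r (hz'.1 ▸ hpos.1) (hz'.2 ▸ hpos.2)]
      · simp only [isMultiploLoop, hall, if_true, hsub, hz, ite_false]
        rw [ih (a0 - b0) (a1 - b1) (r + 1) ?_,
          pvT_step b0 b1 a0 a1 r hpos.1 hpos.2 (by simpa using hz)]
        rcases h with ⟨hbp, hf⟩ | ⟨hbp, hf⟩
        · left; exact ⟨hbp, by omega⟩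
        · right; exact ⟨hbp, by omega⟩
    · have hall : ([a0, a1].all (fun i => decide (0 < i))) = false := by
        simp only [List.all_cons, List.all_nil, Bool.and_true, Bool.and_eq_false_iff,
          decide_eq_false_iff_not, not_lt]
        omega
      simp only [isMultiploLoop, hall, Bool.false_eq_true, if_false]
      unfold pvT
      rw [if_neg]; intro hc; exact hpos ⟨hc.1, hc.2.1⟩

-- ===== VERDICT (by name: the statement is the Claim_ definition above) =====
theorem isMultiplo_spec : Claim_equal_isMultiplo := by
  intro a b _ hpre
  unfold Spec_isMultiplo
  by_cases hneg : ∃ x ∈ a, x ≤ 0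
  · obtain ⟨x, hx, hxle⟩ := hneg
    have hall : (a.all (fun i => decide (0 < i))) = false := by
      simp only [List.all_eq_false]; exact ⟨x, hx, by simp; omega⟩
    have hany : (a.any (fun i => decide (i ≤ 0))) = true := by
      simp only [List.any_eq_true]; exact ⟨x, hx, by simpa using hxle⟩
    unfold isMultiplo isMultiplo_alt
    simp [isMultiploLoop, hall, hany]
  · push_neg at hneg
    rcases hpre with h | ⟨hla, hlb, hbpos⟩
    · obtain ⟨x, hx, hxle⟩ := h; exact absurd (hneg x hx) (by omega)
    obtain ⟨a0, a1, arest2, rfl⟩ : ∃ a0 a1 t, a = a0 :: a1 :: t := by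
      match a, hla with
      | a0 :: a1 :: t, _ => exact ⟨a0, a1, t, rfl⟩
    obtain ⟨b0, b1, brest2, rfl⟩ : ∃ b0 b1 t, b = b0 :: b1 :: t := by
      match b, hlb with
      | b0 :: b1 :: t, _ => exact ⟨b0, b1, t, rfl⟩
    have hgb0 : PySem.List.pyGet? (b0 :: b1 :: brest2) 0 = some b0 := by
      simp
    have hgb1 : PySem.List.pyGet? (b0 :: b1 :: brest2) 1 = some b1 := by
      simp
    have ha0 : 0 < a0 := hneg a0 (by simp)
    have ha1 : 0 < a1 := hneg a1 (by simp)
    have hbp : 0 < b0 ∨ 0 < b1 := by simpa using hbpos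
    -- B computes pvT b0 b1 a0 a1 0
    have hB : isMultiplo_alt (a0 :: a1 :: arest2) (b0 :: b1 :: brest2) = pvT b0 b1 a0 a1 0 := by
      have hany : ((a0 :: a1 :: arest2).any (fun i => decide (i ≤ 0))) = false := by
        simp only [List.any_eq_false]
        intro x hx
        simp only [decide_eq_true_eq, not_le]
        exact hneg x hx
      have hga0 : PySem.List.pyGet? (a0 :: a1 :: arest2) 0 = some a0 := by
        simp
      have hga1 : PySem.List.pyGet? (a0 :: a1 :: arest2) 1 = some a1 := by
        simp
      unfold isMultiplo_alt
      rw [hany]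
      simp only [Bool.false_eq_true, if_false, hga0, hga1, hgb0, hgb1]
      unfold pvT
      by_cases hb01 : 0 < b0 ∧ 0 < b1
      · rw [PySem.Int.mod_eq_emod_of_pos hb01.1, PySem.Int.floordiv_eq_ediv_of_pos hb01.1]
        have hiff : (a0 % b0 = 0) ↔ (b0 ∣ a0) :=
          ⟨Int.dvd_of_emod_eq_zero, Int.emod_eq_zero_of_dvd⟩
        simp only [hiff, ha0, ha1, true_and, zero_add]
      · rw [if_neg (by tauto), if_neg (by tauto)]
    rw [hB]
    unfold isMultiplo
    have hall : ((a0 :: a1 :: arest2).all (fun i => decide (0 < i))) = true := by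
      simp only [List.all_eq_true]; intro x hx; simpa using hneg x hx
    have hsub : subLists (a0 :: a1 :: arest2) (b0 :: b1 :: brest2) = some [a0 - b0, a1 - b1] := by
      simp [subLists]
    simp only [List.map_cons, List.sum_cons]
    simp only [isMultiploLoop, hall, if_true, hsub]
    by_cases hz : ([a0 - b0, a1 - b1] : List Int) = ([0, 0] : List Int)
    · simp only [hz, ite_true]
      have hz' : a0 = b0 ∧ a1 = b1 := by
        simp only [List.cons.injEq, and_true] at hz; omega
      rw [hz'.1, hz'.2, pvT_hit b0 b1 0 (hz'.1 ▸ ha0) (hz'.2 ▸ ha1)]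
    · simp only [hz, ite_false]
      rw [loop_eq_pvT _ b0 b1 hgb0 hgb1 _ (a0 - b0) (a1 - b1) (0 + 1) ?_,
        pvT_step b0 b1 a0 a1 0 ha0 ha1 (by simpa using hz)]
      rcases hbp with hbp | hbp
      · left; exact ⟨hbp, by omega⟩
      · right; exact ⟨hbp, by omega⟩
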